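-- pv_equiv track=rewrite | github.com/ivyycc/lora-finetuning-finQA | content/scripts/inference_fixed.py | verify_eval_tokens
-- ===== SOURCE A (Python) =====
-- ALLOWED_OPS = {"add", "subtract", "multiply", "divide", "exp", "greater"}
--
-- def verify_eval_tokens(tokens):
--     # Check 4-token step pattern + final EOF
--     if not tokens or tokens[-1] != "EOF":
--         return False
--     if len(tokens) == 1:
--         return True
--     body = tokens[:-1]
--     if len(body) % 4 != 0:
--         return False
--     for i in range(0, len(body), 4):
--         t0, t1, t2, t3 = body[i:i+4]
--         if not t0.endswith("("):
--             return False
--         op = t0[:-1].lower()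
--         if not (op in ALLOWED_OPS or op.startswith("table_")):
--             return False
--         if t3 != ")":
--             return False
--     return True
-- ===== SOURCE B (Python) =====
-- ALLOWED_OPS = {"add", "subtract", "multiply", "divide", "exp", "greater"}
--
-- def _is_step_op(t):
--     op = t[:-1].lower()
--     return t.endswith("(") and (op in ALLOWED_OPS or op.startswith("table_"))
--
-- def verify_eval_tokens(tokens):
--     # Role projection: after the guards, split the body by position mod 4 into a
--     # set of closer tokens and a set of opener tokens, and test each set
--     # wholesale, instead of walking the body in 4-token chunks.
--     if not tokens or tokens[-1] != "EOF":
--         return False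
--     if len(tokens) == 1:
--         return True
--     body = tokens[:-1]
--     if len(body) % 4 != 0:
--         return False
--     closes = {t for i, t in enumerate(body) if i % 4 == 3}
--     opens = {t for i, t in enumerate(body) if i % 4 == 0}
--     return closes <= {")"} and all(_is_step_op(t) for t in opens)
-- ===== Notes on version B (the rewrite author's own statement) =====
-- stated objective: alternative
-- what changed: B replaces A's chunk walk (index loop over range(0,len,4), slicing each 4-token group and early-returning per check) with a role projection: it collects the position-mod-4 openers and closers into two Python sets and judges them wholesale via a set-subset test against {')'} and one all() over the distinct openers.
import Mathlib
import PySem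

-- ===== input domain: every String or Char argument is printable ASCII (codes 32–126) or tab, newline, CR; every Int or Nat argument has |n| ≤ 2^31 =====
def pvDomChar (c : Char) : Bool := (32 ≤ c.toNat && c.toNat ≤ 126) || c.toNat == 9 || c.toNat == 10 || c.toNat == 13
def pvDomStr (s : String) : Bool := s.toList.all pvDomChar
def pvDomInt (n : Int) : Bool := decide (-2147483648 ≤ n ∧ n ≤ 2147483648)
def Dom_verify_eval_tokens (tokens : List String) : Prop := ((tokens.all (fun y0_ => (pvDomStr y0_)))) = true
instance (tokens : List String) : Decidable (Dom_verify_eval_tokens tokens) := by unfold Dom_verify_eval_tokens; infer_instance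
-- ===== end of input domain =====

-- B validates the same 4-token step pattern by role projection: it splits the body
-- by position mod 4 into a set of openers and a set of closers and judges each set
-- wholesale (set-subset against {")"}, one all() over the distinct openers),
-- instead of A's index loop over range(0,len,4) slicing 4-token chunks.

-- ===== PORT A =====
-- ALLOWED_OPS (a Python set of distinct literals)
def pvAllowedOps : List String := ["add", "subtract", "multiply", "divide", "exp", "greater"]

-- the for-loop 'for i in range(0, len(body), 4)' with its early returns
def pvALoop (body : List String) (i : Nat) : Bool :=
  if _h : i < body.length then
    match PySem.List.slice body (some (i : Int)) (some ((i : Int) + 4)) with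
    | [t0, _t1, _t2, t3] =>
      if !(PySem.Str.endswith t0 "(") then false
      else
        let op := PySem.Str.lower (PySem.Str.slice t0 none (some (-1)))
        if !(pvAllowedOps.contains op || PySem.Str.startswith op "table_") then false
        else if t3 ≠ ")" then false
        else pvALoop body (i + 4)
    | _ => false  -- unpack of a chunk shorter than 4 (unreachable under the %4 guard)
  else true
termination_by body.length - i

def verify_eval_tokens (tokens : List String) : Bool :=
  if tokens.isEmpty || !(PySem.List.pyGet? tokens (-1) == some "EOF") then false
  else if tokens.length = 1 then true
  else
    let body := PySem.List.slice tokens none (some (-1))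
    if body.length % 4 ≠ 0 then false
    else pvALoop body 0

-- ===== PORT B =====
-- _is_step_op(t): the per-opener predicate of Source B
def pvIsStepOp (t : String) : Bool :=
  let op := PySem.Str.lower (PySem.Str.slice t none (some (-1)))
  PySem.Str.endswith t "(" && (pvAllowedOps.contains op || PySem.Str.startswith op "table_")

def verify_eval_tokens_alt (tokens : List String) : Bool :=
  if tokens.isEmpty || !(PySem.List.pyGet? tokens (-1) == some "EOF") then false
  else if tokens.length = 1 then true
  else
    let body := PySem.List.slice tokens none (some (-1))
    if body.length % 4 ≠ 0 then false
    else
      -- closes = {t for i, t in enumerate(body) if i % 4 == 3}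
      let closes : PySem.Set String :=
        PySem.Set.ofList (((PySem.List.enumerate body).filter
          (fun p => PySem.Int.mod p.1 4 == 3)).map (·.2))
      -- opens = {t for i, t in enumerate(body) if i % 4 == 0}
      let opens : PySem.Set String :=
        PySem.Set.ofList (((PySem.List.enumerate body).filter
          (fun p => PySem.Int.mod p.1 4 == 0)).map (·.2))
      PySem.Set.issubset closes (PySem.Set.ofList [")"]) && opens.all pvIsStepOp

-- ===== PRECONDITION & SPEC =====
def Spec_verify_eval_tokens (tokens : List String) (out : Bool) : Prop := out = verify_eval_tokens_alt tokens
instance (tokens : List String) (out : Bool) : Decidable (Spec_verify_eval_tokens tokens out) := by unfold Spec_verify_eval_tokens; infer_instance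

-- ===== CLAIM (what is proved, stated in full; the proofs are below) =====
def Claim_equal_verify_eval_tokens : Prop := ∀ (tokens : List String), Dom_verify_eval_tokens tokens → Spec_verify_eval_tokens tokens (verify_eval_tokens tokens)

-- ===== LEMMAS AND PROOFS =====

-- the reference shape both ports are reduced to: the body checked 4 tokens at a time
def pvRef : List String → Bool
  | t0 :: _ :: _ :: t3 :: rest => if pvIsStepOp t0 && (t3 == ")") then pvRef rest else false
  | [] => true
  | _ => false  -- length not a multiple of 4 (unreachable under the %4 guard)

-- the tokens of body at positions ≡ r (mod 4), starting the enumeration at s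
def pvProj (r : Int) (body : List String) (s : Int) : List String :=
  ((PySem.List.enumerate body s).filter (fun p => PySem.Int.mod p.1 4 == r)).map (·.2)

theorem pvProj_nil (r s : Int) : pvProj r [] s = [] := by
  simp [pvProj, PySem.List.enumerate_nil]

-- peeling one 4-token chunk off a projection, for a chunk-aligned start
theorem pvProj_chunk (r : Int) (hr : 0 ≤ r) (hr4 : r < 4) (t0 t1 t2 t3 : String)
    (rest : List String) (s : Int) (hs : (4 : Int) ∣ s) :
    pvProj r (t0 :: t1 :: t2 :: t3 :: rest) s =
      (if r = 0 then [t0] else if r = 1 then [t1] else if r = 2 then [t2] else [t3])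
        ++ pvProj r rest (s + 4) := by
  obtain ⟨k, rfl⟩ := hs
  have hmod : ∀ a b : Int, 0 ≤ b → b < 4 → a = 4 * k + b → PySem.Int.mod a 4 = b := by
    intro a b hb hb4 ha
    rw [PySem.Int.mod_eq_emod_of_pos (by norm_num)]
    omega
  simp only [pvProj, PySem.List.enumerate_cons]
  rw [show (4 * k + 1 + 1 + 1 + 1 : Int) = 4 * k + 4 by ring]
  simp only [List.filter_cons]
  rw [hmod (4 * k) 0 (by norm_num) (by norm_num) (by ring),
      hmod (4 * k + 1) 1 (by norm_num) (by norm_num) (by ring),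
      hmod (4 * k + 1 + 1) 2 (by norm_num) (by norm_num) (by ring),
      hmod (4 * k + 1 + 1 + 1) 3 (by norm_num) (by norm_num) (by ring)]
  interval_cases r <;> simp

-- B's two set tests over ofList reduce to plain list alls
theorem pvSet_all (xs : List String) (p : String → Bool) :
    (PySem.Set.ofList xs).all p = xs.all p := by
  rw [Bool.eq_iff_iff]
  simp [List.all_eq_true, PySem.Set.mem_ofList]

theorem pvSet_sub (xs : List String) :
    PySem.Set.issubset (PySem.Set.ofList xs) (PySem.Set.ofList [")"]) =
      xs.all (fun t => t == ")") := by
  rw [Bool.eq_iff_iff]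
  simp [PySem.Set.issubset, List.all_eq_true, PySem.Set.mem_ofList]

-- B's role-projection verdict equals the reference 4-at-a-time check
theorem pvRef_proj (rest : List String) (s : Int) (hs : (4 : Int) ∣ s)
    (hlen : rest.length % 4 = 0) :
    ((pvProj 3 rest s).all (fun t => t == ")") && (pvProj 0 rest s).all pvIsStepOp) =
      pvRef rest := by
  match rest with
  | [] => simp [pvProj_nil, pvRef]
  | [_] => simp at hlen
  | [_, _] => simp at hlen
  | [_, _, _] => simp at hlen
  | t0 :: t1 :: t2 :: t3 :: rest' =>
    have hlen' : rest'.length % 4 = 0 := by simp at hlen; omega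
    have ih := pvRef_proj rest' (s + 4) (by omega) hlen'
    rw [pvProj_chunk 3 (by norm_num) (by norm_num) t0 t1 t2 t3 rest' s hs,
        pvProj_chunk 0 (by norm_num) (by norm_num) t0 t1 t2 t3 rest' s hs]
    simp only [pvRef]
    cases hb : pvIsStepOp t0 <;> cases h3 : (t3 == ")") <;> simp_all

-- A's index loop, started at offset pre.length into pre ++ rest, is the reference check
theorem pvKey (rest pre : List String) (hlen : rest.length % 4 = 0) :
    pvALoop (pre ++ rest) pre.length = pvRef rest := by
  have h4c : ∀ j : Nat, ((j : Int) + 4) = ((j : Int) + ((4 : Nat) : Int)) := by norm_num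
  match rest with
  | [] =>
    rw [pvALoop]
    simp [pvRef]
  | [_] => simp at hlen
  | [_, _] => simp at hlen
  | [_, _, _] => simp at hlen
  | t0 :: t1 :: t2 :: t3 :: rest' =>
    have hlen' : rest'.length % 4 = 0 := by simp at hlen; omega
    have ih := pvKey rest' (pre ++ [t0, t1, t2, t3]) hlen'
    have ih' : pvALoop (pre ++ t0 :: t1 :: t2 :: t3 :: rest') (pre.length + 4) = pvRef rest' := by
      have e1 : (pre ++ [t0, t1, t2, t3]) ++ rest' = pre ++ t0 :: t1 :: t2 :: t3 :: rest' := by simp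
      have e2 : (pre ++ [t0, t1, t2, t3]).length = pre.length + 4 := by simp
      rw [e1, e2] at ih
      exact ih
    have hlt : pre.length < (pre ++ t0 :: t1 :: t2 :: t3 :: rest').length := by
      simp
    have hsl : PySem.List.slice (pre ++ t0 :: t1 :: t2 :: t3 :: rest')
        (some (pre.length : Int)) (some ((pre.length : Int) + 4)) = [t0, t1, t2, t3] := by
      rw [h4c, PySem.List.slice_natCast_add]
      simp [List.take_succ_cons]
    rw [pvALoop, dif_pos hlt, hsl]
    simp only [pvRef, pvIsStepOp, ih']
    by_cases he : PySem.Str.endswith t0 "(" = true <;>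
      by_cases ho : (pvAllowedOps.contains (PySem.Str.lower (PySem.Str.slice t0 none (some (-1)))) ||
        PySem.Str.startswith (PySem.Str.lower (PySem.Str.slice t0 none (some (-1)))) "table_") = true <;>
      by_cases h3 : t3 = ")" <;>
      simp_all
termination_by rest.length

-- ===== VERDICT (by name: the statement is the Claim_ definition above) =====
theorem verify_eval_tokens_spec : Claim_equal_verify_eval_tokens := by
  intro tokens _hdom
  unfold Spec_verify_eval_tokens verify_eval_tokens verify_eval_tokens_alt
  by_cases hg : (tokens.isEmpty || !(PySem.List.pyGet? tokens (-1) == some "EOF")) = true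
  · simp only [if_pos hg]
  · simp only [if_neg hg]
    by_cases h1 : tokens.length = 1
    · simp only [if_pos h1]
    · simp only [if_neg h1]
      by_cases h4 : (PySem.List.slice tokens none (some (-1))).length % 4 = 0
      · have key := pvKey (PySem.List.slice tokens none (some (-1))) [] h4
        simp only [List.nil_append, List.length_nil] at key
        simp only [if_neg (by omega : ¬ (PySem.List.slice tokens none (some (-1))).length % 4 ≠ 0)]
        have hp := pvRef_proj (PySem.List.slice tokens none (some (-1))) 0 (by norm_num) h4
        simp only [pvProj] at hp
        rw [key, pvSet_sub, pvSet_all]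
        exact hp.symm
      · simp [h4]
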